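-- pv_equiv track=rewrite | github.com/TheTechOddBug/lon-mirror | omnia_mirror_v2.py | summarize_multibase
-- ===== SOURCE A (Python) =====
-- ALPHABET = "0123456789ABCDEFGHIJKLMNOPQRSTUVWXYZ"
--
-- def to_base(n, base):
--     if base < 2 or base > 36:
--         raise ValueError("Base must be in [2, 36]")
--     if n == 0:
--         return "0"
--     sign = "-" if n < 0 else ""
--     n = abs(n)
--     out = []
--     while n > 0:
--         n, r = divmod(n, base)
--         out.append(ALPHABET[r])
--     return sign + "".join(reversed(out))
--
-- def parse_ints_from_text(text):
--     vals = []
--     curr = ""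
--     for ch in text:
--         if ch.isdigit() or (ch == "-" and not curr):
--             curr += ch
--         else:
--             if curr not in ("", "-"):
--                 try:
--                     vals.append(int(curr))
--                 except:
--                     pass
--             curr = ""
--     if curr not in ("", "-"):
--         try:
--             vals.append(int(curr))
--         except:
--             pass
--     return vals
--
-- def numeric_multibase_repr(text, bases=(2,3,5,7,10,16)):
--     nums = parse_ints_from_text(text)
--     if not nums:
--         return {}
--     out = {}
--     for b in bases:
--         out[b] = "|".join(to_base(n, b) for n in nums)
--     return out
--
-- def summarize_multibase(text, bases=(2,3,5,7,10,16)):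
--     reps = numeric_multibase_repr(text, bases=bases)
--     if not reps:
--         return "No integers detected."
--     lines = []
--     for b in bases:
--         if b in reps:
--             rep = reps[b]
--             short = rep if len(rep) <= 60 else rep[:57] + "..."
--             lines.append(f"base {b:>2}: {short}")
--     return "\n".join(lines)
-- ===== SOURCE B (Python) =====
-- ALPHABET = "0123456789ABCDEFGHIJKLMNOPQRSTUVWXYZ"
--
-- def to_base(n, base):
--     if base < 2 or base > 36:
--         raise ValueError("Base must be in [2, 36]")
--     if n == 0:
--         return "0"
--     sign = "-" if n < 0 else ""
--     n = abs(n)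
--     out = []
--     while n > 0:
--         n, r = divmod(n, base)
--         out.append(ALPHABET[r])
--     return sign + "".join(reversed(out))
--
-- def parse_ints_from_text(text):
--     vals = []
--     curr = ""
--     for ch in text:
--         if ch.isdigit() or (ch == "-" and not curr):
--             curr += ch
--         else:
--             if curr not in ("", "-"):
--                 try:
--                     vals.append(int(curr))
--                 except:
--                     pass
--             curr = ""
--     if curr not in ("", "-"):
--         try:
--             vals.append(int(curr))
--         except:
--             pass
--     return vals
--
-- def summarize_multibase(text, bases=(2,3,5,7,10,16)):
--     # Lazy truncation: each line keeps at most 60 display characters, so we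
--     # never materialize the full joined representation (or any reps dict):
--     # per base we convert numbers only until the running display length
--     # exceeds 60, then cut to 57 chars + "...".  If no lines were produced
--     # there is nothing to report.
--     nums = parse_ints_from_text(text)
--     lines = []
--     if nums:
--         for b in bases:
--             parts = []
--             length = -1  # running len("|".join(parts))
--             for n in nums:
--                 p = to_base(n, b)
--                 parts.append(p)
--                 length += len(p) + 1
--                 if length > 60:
--                     break
--             joined = "|".join(parts)
--             short = joined if length <= 60 else joined[:57] + "..."
--             lines.append(f"base {b:>2}: {short}")
--     if not lines:
--         return "No integers detected."
--     return "\n".join(lines)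
-- ===== Notes on version B (the rewrite author's own statement) =====
-- stated objective: alternative
-- what changed: Drops the reps dict of fully joined per-base strings: B truncates lazily, converting numbers in each base only until the running 60-character display budget is exceeded (then cutting to 57 chars plus an ellipsis), never materializing the full join, and emits the no-integers message when no lines were produced.
import Mathlib
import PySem

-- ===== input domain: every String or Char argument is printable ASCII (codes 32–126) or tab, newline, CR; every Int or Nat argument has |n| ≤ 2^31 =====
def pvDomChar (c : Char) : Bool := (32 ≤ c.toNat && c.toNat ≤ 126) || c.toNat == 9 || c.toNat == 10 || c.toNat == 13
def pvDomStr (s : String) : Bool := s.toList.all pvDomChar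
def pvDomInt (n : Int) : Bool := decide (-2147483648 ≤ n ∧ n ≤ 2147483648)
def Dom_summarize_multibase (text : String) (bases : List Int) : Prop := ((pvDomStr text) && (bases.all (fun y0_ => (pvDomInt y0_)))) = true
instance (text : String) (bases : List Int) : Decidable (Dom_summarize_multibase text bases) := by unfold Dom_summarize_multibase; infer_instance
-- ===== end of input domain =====

-- B replaces A's reps dict of fully joined representations by lazy per-line truncation
-- (numbers are converted in each base only until the 60-character display budget is
-- exceeded, never materializing the full join) and emits the no-integers message
-- when no lines were produced; objective: alternative.

-- ===== SHARED MODULE-LEVEL HELPERS (to_base / parse_ints_from_text are verbatim identical in Source A and Source B) =====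

def pvALPHABET : List Char := "0123456789ABCDEFGHIJKLMNOPQRSTUVWXYZ".toList

-- 'while n > 0: n, r = divmod(n, base); out.append(ALPHABET[r])' — fuel n.toNat bounds the
-- iteration count (n strictly decreases, base ≥ 2); ALPHABET[r] with 0 ≤ r < base ≤ 36 is
-- always in range, so the getD default ' ' is unreachable.
def pvToBaseLoop : Nat → Int → Int → List Char → List Char
  | 0, _, _, out => out
  | f + 1, n, base, out =>
    if n > 0 then
      pvToBaseLoop f (PySem.Int.floordiv n base) base
        (out ++ [(PySem.List.pyGet? pvALPHABET (PySem.Int.mod n base)).getD ' '])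
    else out

-- to_base(n, base), as a char list. On base < 2 or base > 36 Python raises ValueError
-- (excluded by Pre_); the port returns [] there.
def pvToBase (n base : Int) : List Char :=
  if base < 2 ∨ base > 36 then []
  else if n = 0 then ['0']
  else
    (if n < 0 then ['-'] else []) ++ (pvToBaseLoop (|n|).toNat |n| base []).reverse

-- the duplicated 'if curr not in ("", "-"): try: vals.append(int(curr)) except: pass'
def pvFlush (vals : List Int) (curr : List Char) : List Int :=
  if curr = [] ∨ curr = ['-'] then vals
  else
    match PySem.Int.ofChars? curr with
    | some v => vals ++ [v]
    | none => vals

def pvParseLoop : List Char → List Int → List Char → List Int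
  | [], vals, curr => pvFlush vals curr
  | ch :: rest, vals, curr =>
    if PySem.Chars.isdigit ch || (ch == '-' && curr.isEmpty) then
      pvParseLoop rest vals (curr ++ [ch])
    else
      pvParseLoop rest (pvFlush vals curr) []

-- parse_ints_from_text(text)
def pvParseInts (text : List Char) : List Int := pvParseLoop text [] []

-- the identical f-string of both versions: f"base {b:>2}: {short}"
-- ({b:>2} right-justifies str(b) to width 2 with spaces)
def pvFormatLine (b : Int) (short : List Char) : List Char :=
  let s := PySem.Int.toChars b
  ['b', 'a', 's', 'e', ' '] ++ (if s.length < 2 then List.replicate (2 - s.length) ' ' ++ s else s)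
    ++ [':', ' '] ++ short

-- ===== PORT A =====

-- A's truncation: 'short = rep if len(rep) <= 60 else rep[:57] + "..."'
def pvShortLine (b : Int) (rep : List Char) : List Char :=
  pvFormatLine b
    (if rep.length ≤ 60 then rep
     else PySem.List.slice rep none (some (57 : Int)) ++ ['.', '.', '.'])

-- numeric_multibase_repr(text, bases)
def pvNumericMultibase (text : List Char) (bases : List Int) : PySem.Dict Int (List Char) :=
  let nums := pvParseInts text
  if nums = [] then PySem.Dict.empty
  else
    bases.foldl
      (fun out b => out.insert b (PySem.Chars.join ['|'] (nums.map (fun n => pvToBase n b))))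
      PySem.Dict.empty

def summarize_multibase (text : String) (bases : List Int) : String :=
  let reps := pvNumericMultibase text.toList bases
  if reps.items = [] then "No integers detected."
  else
    let lines := bases.foldl
      (fun ls b => if reps.contains b then ls ++ [pvShortLine b (reps.getD b [])] else ls) []
    String.ofList (PySem.Chars.join ['\n'] lines)

-- ===== PORT B =====

-- 'for n in nums: p = to_base(n, b); parts.append(p); length += len(p)+1; if length > 60: break'
def pvCollect (b : Int) : List Int → List (List Char) → Int → (List (List Char)) × Int
  | [], parts, len => (parts, len)
  | n :: rest, parts, len =>
    let p := pvToBase n b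
    let parts' := parts ++ [p]
    let len' := len + p.length + 1
    if len' > 60 then (parts', len') else pvCollect b rest parts' len'

def summarize_multibase_alt (text : String) (bases : List Int) : String :=
  let nums := pvParseInts text.toList
  let lines :=
    if nums = [] then []
    else bases.foldl
      (fun ls b =>
        let r := pvCollect b nums [] (-1)
        let joined := PySem.Chars.join ['|'] r.1
        let short := if r.2 ≤ 60 then joined
                     else PySem.List.slice joined none (some (57 : Int)) ++ ['.', '.', '.']
        ls ++ [pvFormatLine b short]) []
  if lines = [] then "No integers detected."
  else String.ofList (PySem.Chars.join ['\n'] lines)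

-- ===== PRECONDITION & SPEC =====

-- Pre_ excludes exactly the inputs where both Pythons raise ValueError: a base outside
-- [2, 36] is reached iff some integer is parsed, i.e. iff the text contains a decimal digit.
def Pre_summarize_multibase (text : String) (bases : List Int) : Prop :=
  (∀ b ∈ bases, 2 ≤ b ∧ b ≤ 36) ∨ (∀ c ∈ text.toList, PySem.Chars.isdigit c = false)
instance (text : String) (bases : List Int) : Decidable (Pre_summarize_multibase text bases) := by
  unfold Pre_summarize_multibase; infer_instance

def pvWitness_summarize_multibase : String × List Int := ("x 12 -7,9", [2, 10, 16, 10])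

def Spec_summarize_multibase (text : String) (bases : List Int) (out : String) : Prop :=
  out = summarize_multibase_alt text bases
instance (text : String) (bases : List Int) (out : String) : Decidable (Spec_summarize_multibase text bases out) := by
  unfold Spec_summarize_multibase; infer_instance

-- ===== CLAIM (what is proved, stated in full; the proofs are below) =====
def Claim_equal_summarize_multibase : Prop := ∀ (text : String) (bases : List Int), Dom_summarize_multibase text bases → Pre_summarize_multibase text bases → Spec_summarize_multibase text bases (summarize_multibase text bases)

-- ===== LEMMAS AND PROOFS =====

-- lookup of an insert-loop whose value depends only on the key
theorem pvGetD_foldl_insert (l : List Int) {α : Type} (f : Int → α) (d0 : PySem.Dict Int α)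
    (b : Int) (dflt : α) :
    ((l.foldl (fun d x => d.insert x (f x)) d0).getD b dflt)
      = if b ∈ l then f b else d0.getD b dflt := by
  induction l generalizing d0 with
  | nil => simp
  | cons a rest ih =>
    simp only [List.foldl_cons, ih, List.mem_cons]
    by_cases hb : b ∈ rest
    · simp [hb]
    · by_cases hba : b = a <;> simp [hb, hba, PySem.Dict.getD_insert]

theorem pvContains_foldl_insert (l : List Int) {α : Type} (f : Int → α) (b : Int)
    (hb : b ∈ l) :
    ((l.foldl (fun d x => d.insert x (f x)) PySem.Dict.empty).contains b) = true := by
  rw [PySem.Dict.contains_iff_mem_keys, PySem.Dict.keys_foldl_insert (f := fun _ x => f x)]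
  simp [PySem.Set.mem_update, hb]

theorem pvItems_foldl_insert_ne_nil (l : List Int) {α : Type} (f : Int → α) (hl : l ≠ []) :
    ((l.foldl (fun d x => d.insert x (f x)) PySem.Dict.empty).items) ≠ [] := by
  intro hitems
  rcases List.exists_mem_of_ne_nil l hl with ⟨a, ha⟩
  have := pvContains_foldl_insert l f a ha
  rw [PySem.Dict.contains_iff_mem_keys] at this
  have hkeys : (l.foldl (fun d x => d.insert x (f x)) PySem.Dict.empty).keys
      = (l.foldl (fun d x => d.insert x (f x)) PySem.Dict.empty).items.map Prod.fst := rfl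
  rw [hkeys, hitems] at this
  simp at this

theorem pvRepsValue (nums : List Int) (bases : List Int) (b : Int) (hb : b ∈ bases) :
    ((bases.foldl
        (fun out b => out.insert b (PySem.Chars.join ['|'] (nums.map (fun n => pvToBase n b))))
        PySem.Dict.empty).getD b [])
      = PySem.Chars.join ['|'] (nums.map (fun n => pvToBase n b)) := by
  rw [pvGetD_foldl_insert bases
        (fun b => PySem.Chars.join ['|'] (nums.map (fun n => pvToBase n b))), if_pos hb]

-- '|'-join over an append of nonempty lists of parts
theorem pvJoin_append (ps qs : List (List Char)) (hp : ps ≠ []) (hq : qs ≠ []) :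
    PySem.Chars.join ['|'] (ps ++ qs)
      = PySem.Chars.join ['|'] ps ++ ['|'] ++ PySem.Chars.join ['|'] qs := by
  induction ps with
  | nil => exact absurd rfl hp
  | cons p rest ih =>
    cases rest with
    | nil =>
      cases qs with
      | nil => exact absurd rfl hq
      | cons q qrest => simp [PySem.Chars.join_cons_cons, PySem.Chars.join_singleton]
    | cons p2 rest2 =>
      have ih' := ih (by simp)
      simp only [List.cons_append] at ih' ⊢
      rw [PySem.Chars.join_cons_cons ['|'] p p2 (rest2 ++ qs), ih',
          PySem.Chars.join_cons_cons ['|'] p p2 rest2]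
      simp

-- a ≥61-char prefix of parts determines the truncated display of the full join
theorem pvShort_prefix (pref rest : List (List Char)) (hp : pref ≠ [])
    (hlen : 60 < (PySem.Chars.join ['|'] pref).length) :
    (if (PySem.Chars.join ['|'] (pref ++ rest)).length ≤ 60 then
       PySem.Chars.join ['|'] (pref ++ rest)
     else PySem.List.slice (PySem.Chars.join ['|'] (pref ++ rest)) none (some (57 : Int))
            ++ ['.', '.', '.'])
    = PySem.List.slice (PySem.Chars.join ['|'] pref) none (some (57 : Int)) ++ ['.', '.', '.'] := by
  cases rest with
  | nil => rw [List.append_nil, if_neg (by omega)]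
  | cons q qs =>
    rw [pvJoin_append pref (q :: qs) hp (by simp), if_neg (by simp; omega),
        PySem.List.slice_to _ (by norm_num), PySem.List.slice_to _ (by norm_num),
        List.append_assoc, List.take_append_of_le_length (by omega)]

-- B's truncated display of the collected parts equals A's truncation of the full join.
-- Invariant: len = length (join parts); early exit keeps a ≥61-char prefix of the full join.
theorem pvCollect_shortEq (b : Int) (ms : List Int) (parts : List (List Char))
    (hp : parts ≠ []) :
    (let r := pvCollect b ms parts ((PySem.Chars.join ['|'] parts).length : Int);
     let joined := PySem.Chars.join ['|'] r.1;
     if r.2 ≤ 60 then joined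
     else PySem.List.slice joined none (some (57 : Int)) ++ ['.', '.', '.'])
    = (let rep := PySem.Chars.join ['|'] (parts ++ ms.map (fun n => pvToBase n b));
       if rep.length ≤ 60 then rep
       else PySem.List.slice rep none (some (57 : Int)) ++ ['.', '.', '.']) := by
  induction ms generalizing parts with
  | nil =>
    simp only [pvCollect, List.map_nil, List.append_nil]
    split_ifs with h1 h2 h2 <;> first | rfl | omega
  | cons n rest ih =>
    simp only [pvCollect, List.map_cons]
    have hjoin : PySem.Chars.join ['|'] (parts ++ [pvToBase n b])
        = PySem.Chars.join ['|'] parts ++ ['|'] ++ pvToBase n b := by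
      rw [pvJoin_append parts [pvToBase n b] hp (by simp), PySem.Chars.join_singleton]
    have hlen' : ((PySem.Chars.join ['|'] parts).length : Int) + ((pvToBase n b).length : Int) + 1
        = ((PySem.Chars.join ['|'] (parts ++ [pvToBase n b])).length : Int) := by
      rw [hjoin]; simp; omega
    have hsplit : parts ++ (pvToBase n b :: rest.map (fun n => pvToBase n b))
        = (parts ++ [pvToBase n b]) ++ rest.map (fun n => pvToBase n b) := by simp
    by_cases hgt :
        ((PySem.Chars.join ['|'] parts).length : Int) + ((pvToBase n b).length : Int) + 1 > 60
    · rw [if_pos hgt]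
      simp only []
      rw [if_neg (by omega), hsplit,
          pvShort_prefix (parts ++ [pvToBase n b]) _ (by simp [hp]) (by omega)]
    · rw [if_neg hgt, hlen', ih (parts ++ [pvToBase n b]) (by simp [hp]), hsplit]

-- the whole per-base line of B from the start state ([], -1)
theorem pvCollect_top (b m : Int) (ms : List Int) :
    (let r := pvCollect b (m :: ms) [] (-1);
     let joined := PySem.Chars.join ['|'] r.1;
     if r.2 ≤ 60 then joined
     else PySem.List.slice joined none (some (57 : Int)) ++ ['.', '.', '.'])
    = (let rep := PySem.Chars.join ['|'] ((m :: ms).map (fun n => pvToBase n b));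
       if rep.length ≤ 60 then rep
       else PySem.List.slice rep none (some (57 : Int)) ++ ['.', '.', '.']) := by
  simp only [pvCollect, List.map_cons, List.nil_append]
  have hone : PySem.Chars.join ['|'] [pvToBase m b] = pvToBase m b :=
    PySem.Chars.join_singleton _ _
  have hsplit : (pvToBase m b :: ms.map (fun n => pvToBase n b))
      = [pvToBase m b] ++ ms.map (fun n => pvToBase n b) := rfl
  by_cases hgt : (-1 : Int) + ((pvToBase m b).length : Int) + 1 > 60
  · rw [if_pos hgt]
    simp only []
    rw [if_neg (by omega), hone, hsplit,
        pvShort_prefix [pvToBase m b] _ (by simp) (by rw [hone]; omega), hone]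
  · rw [if_neg hgt,
        show (-1 : Int) + ((pvToBase m b).length : Int) + 1
          = ((PySem.Chars.join ['|'] [pvToBase m b]).length : Int) by rw [hone]; omega,
        pvCollect_shortEq b ms [pvToBase m b] (by simp), hsplit]

-- a per-element append loop over a nonempty list yields a nonempty list
theorem pvFoldl_append_ne_nil {α β : Type} (g : α → β) (l : List α) (init : List β)
    (hl : l ≠ []) :
    l.foldl (fun acc x => acc ++ [g x]) init ≠ [] := by
  rw [PySem.List.foldl_append_singleton_eq_map]
  simp [hl]

-- ===== VERDICT (by name: the statement is the Claim_ definition above) =====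
theorem summarize_multibase_spec : Claim_equal_summarize_multibase := by
  intro text bases _hdom _hpre
  simp only [Spec_summarize_multibase, summarize_multibase, summarize_multibase_alt,
    pvNumericMultibase]
  by_cases hn : pvParseInts text.toList = []
  · simp [hn, PySem.Dict.empty]
  · by_cases hbases : bases = []
    · subst hbases
      simp [hn, PySem.Dict.empty]
    · rw [if_neg hn, if_neg hn,
          if_neg (pvItems_foldl_insert_ne_nil bases
            (fun b => PySem.Chars.join ['|'] ((pvParseInts text.toList).map (fun n => pvToBase n b)))
            hbases),
          if_neg (pvFoldl_append_ne_nil _ bases [] hbases)]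
      congr 1
      congr 1
      -- both line loops build, per base b in order, the formatted line for the
      -- truncated full representation: A via its dict lookup (the guard is always
      -- true), B via its lazily cut collection (pvCollect_top)
      refine Eq.trans (PySem.List.foldl_congr_mem bases _
          (fun ls b => ls ++ [pvShortLine b
            (PySem.Chars.join ['|'] ((pvParseInts text.toList).map (fun n => pvToBase n b)))]) _ ?hA)
        (Eq.symm (PySem.List.foldl_congr_mem bases _
          (fun ls b => ls ++ [pvShortLine b
            (PySem.Chars.join ['|'] ((pvParseInts text.toList).map (fun n => pvToBase n b)))]) _ ?hB))
      case hA =>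
        intro acc b hb
        rw [pvContains_foldl_insert bases _ b hb, if_pos rfl, pvRepsValue _ bases b hb]
      case hB =>
        intro acc b _hb
        rcases hnums : pvParseInts text.toList with _ | ⟨m, ms⟩
        · exact absurd hnums hn
        · have h := pvCollect_top b m ms
          simp only [] at h ⊢
          rw [h]
          simp only [pvShortLine]
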